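-- pv_equiv track=rewrite | github.com/C-Kernel-Engine/C-Kernel-Engine | version/v7/scripts/dataset/materialize_spec04_structured_atoms_v7.py | _parse_prompt_tags
-- ===== SOURCE A (Python) =====
-- def _parse_prompt_tags(prompt: str) -> dict[str, str]:
--     tags: dict[str, str] = {}
--     for token in prompt.split():
--         if not (token.startswith("[") and token.endswith("]")):
--             continue
--         body = token[1:-1]
--         if ":" not in body:
--             continue
--         key, value = body.split(":", 1)
--         tags[key] = value
--     return tags
-- ===== SOURCE B (Python) =====
-- def _parse_prompt_tags(prompt: str) -> dict[str, str]:
--     # Single-pass character-level finite-state machine; no tokenisation, no str.split.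
--     tags: dict[str, str] = {}
--     state, key, value = 0, "", ""  # 0=at token boundary, 1=skip rest of token, 2=in key, 3=in value
--     for c in prompt:
--         if c.isspace():
--             if state == 3 and value.endswith("]"):
--                 tags[key] = value[:-1]
--             state = 0
--         elif state == 0:
--             state, key, value = (2, "", "") if c == "[" else (1, "", "")
--         elif state == 2:
--             if c == ":":
--                 state = 3
--             else:
--                 key += c
--         elif state == 3:
--             value += c
--     if state == 3 and value.endswith("]"):
--         tags[key] = value[:-1]
--     return tags
-- ===== Notes on version B (the rewrite author's own statement) =====
-- stated objective: alternative
-- what changed: A tokenizes with str.split() and then validates/splits each token with startswith/endswith, slicing and a maxsplit-1 colon split; B is a single pass over the characters with a four-state finite-state machine (boundary/skip/key/value) that never materialises a token list and builds key and value incrementally.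
import Mathlib
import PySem

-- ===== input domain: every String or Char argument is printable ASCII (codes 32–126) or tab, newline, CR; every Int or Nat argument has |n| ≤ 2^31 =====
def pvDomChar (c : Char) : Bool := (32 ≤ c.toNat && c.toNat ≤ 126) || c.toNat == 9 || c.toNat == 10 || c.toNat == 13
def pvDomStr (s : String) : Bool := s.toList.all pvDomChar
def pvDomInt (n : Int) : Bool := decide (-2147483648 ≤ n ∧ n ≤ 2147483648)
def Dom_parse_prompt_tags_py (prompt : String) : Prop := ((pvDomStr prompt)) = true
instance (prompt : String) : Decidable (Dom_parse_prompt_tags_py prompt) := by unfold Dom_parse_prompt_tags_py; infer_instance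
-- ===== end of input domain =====

-- B replaces A's tokenize-then-validate pipeline (str.split, slicing, maxsplit-1 colon split) by a single-pass
-- character-level finite-state machine that builds key/value incrementally (objective: alternative).

-- ===== PORT A =====
def parse_prompt_tags_py (prompt : String) : List (String × String) :=
  let tags : PySem.Dict String String := PySem.Dict.empty
  let tags := (PySem.Str.split₀ prompt).foldl (fun tags token =>
    if !(PySem.Str.startswith token "[" && PySem.Str.endswith token "]") then tags
    else
      let body := PySem.Str.slice token (some 1) (some (-1))
      if !(PySem.Str.isIn ":" body) then tags
      else
        -- 'key, value = body.split(":", 1)': the ':'-membership guard makes the defaults unreachable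
        let parts := (PySem.Str.splitMax? body ":" 1).getD []
        let key := parts.getD 0 ""
        let value := parts.getD 1 ""
        tags.insert key value) tags
  tags.items

-- ===== PORT B =====
-- the trailing flush of Source B ('if state == 3 and value.endswith("]"): …' after the loop)
def pvBFlush (tags : PySem.Dict String String) (state : Int) (key value : List Char) :
    PySem.Dict String String :=
  if state = 3 ∧ PySem.Chars.endswith value [']'] then
    tags.insert (String.ofList key) (String.ofList (PySem.Chars.slice value none (some (-1))))
  else tags

-- one iteration of Source B's character loop (Python str concatenation 'key += c' is 'key ++ [c]' on chars)
def pvBStep (s : PySem.Dict String String × Int × List Char × List Char) (c : Char) :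
    PySem.Dict String String × Int × List Char × List Char :=
  let (tags, state, key, value) := s
  if PySem.Chars.isspace c then (pvBFlush tags state key value, 0, key, value)
  else if state = 0 then
    if c = '[' then (tags, 2, [], []) else (tags, 1, [], [])
  else if state = 2 then
    if c = ':' then (tags, 3, key, value) else (tags, 2, key ++ [c], value)
  else if state = 3 then (tags, 3, key, value ++ [c])
  else (tags, state, key, value)

def parse_prompt_tags_py_alt (prompt : String) : List (String × String) :=
  let s := prompt.toList.foldl pvBStep (PySem.Dict.empty, 0, [], [])
  (pvBFlush s.1 s.2.1 s.2.2.1 s.2.2.2).items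

-- ===== PRECONDITION & SPEC =====
def Spec_parse_prompt_tags_py (prompt : String) (out : List (String × String)) : Prop := out = parse_prompt_tags_py_alt prompt
instance (prompt : String) (out : List (String × String)) : Decidable (Spec_parse_prompt_tags_py prompt out) := by unfold Spec_parse_prompt_tags_py; infer_instance

-- ===== CLAIM (what is proved, stated in full; the proofs are below) =====
def Claim_equal_parse_prompt_tags_py : Prop := ∀ (prompt : String), Dom_parse_prompt_tags_py prompt → Spec_parse_prompt_tags_py prompt (parse_prompt_tags_py prompt)

-- ===== LEMMAS AND PROOFS =====

-- A's per-token step, rewritten on character lists (ASTEP below proves it equal to A's string-level step)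
def pvAProc (d : PySem.Dict String String) (t : List Char) : PySem.Dict String String :=
  if ['['].isPrefixOf t ∧ [']'].isSuffixOf t then
    let body := t.tail.dropLast
    if ':' ∈ body then
      d.insert (String.ofList (body.takeWhile (fun c => c != ':')))
               (String.ofList ((body.dropWhile (fun c => c != ':')).tail))
    else d
  else d

-- the state-only part of pvBStep on a non-space character
def pvB3 (q : Int × List Char × List Char) (c : Char) : Int × List Char × List Char :=
  let (state, key, value) := q
  if state = 0 then
    if c = '[' then (2, [], []) else (1, [], [])
  else if state = 2 then
    if c = ':' then (3, key, value) else (2, key ++ [c], value)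
  else if state = 3 then (3, key, value ++ [c])
  else (state, key, value)

def pvScan (t : List Char) : Int × List Char × List Char := t.foldl pvB3 (0, [], [])

-- states agree; key/value agree whenever the state makes them observable
def pvEqv (q q' : Int × List Char × List Char) : Prop :=
  q.1 = q'.1 ∧ ((q.1 = 2 ∨ q.1 = 3) → q = q')

lemma pvBStep_eq (d : PySem.Dict String String) (q : Int × List Char × List Char) (c : Char) :
    pvBStep (d, q) c =
      if PySem.Chars.isspace c then (pvBFlush d q.1 q.2.1 q.2.2, 0, q.2.1, q.2.2)
      else (d, pvB3 q c) := by
  obtain ⟨st, k, v⟩ := q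
  by_cases hsp : PySem.Chars.isspace c <;>
    simp only [pvBStep, pvB3, hsp, if_true, if_false, Bool.false_eq_true] <;> split_ifs <;> rfl

lemma pvEqv_refl (q : Int × List Char × List Char) : pvEqv q q := ⟨rfl, fun _ => rfl⟩

lemma pvEqv_step {q q' : Int × List Char × List Char} (h : pvEqv q q') (c : Char) :
    pvEqv (pvB3 q c) (pvB3 q' c) := by
  obtain ⟨st, k, v⟩ := q
  obtain ⟨st', k', v'⟩ := q'
  obtain ⟨h1, h2⟩ := h
  simp only at h1; subst h1
  by_cases h0 : st = 0
  · subst h0; by_cases hb : c = '[' <;> simp [pvB3, hb] <;> exact pvEqv_refl _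
  · by_cases h2' : st = 2
    · subst h2'; cases h2 (Or.inl rfl)
      by_cases hb : c = ':' <;> simp [pvB3, hb] <;> exact pvEqv_refl _
    · by_cases h3 : st = 3
      · subst h3; cases h2 (Or.inr rfl)
        simp [pvB3]; exact pvEqv_refl _
      · simp only [pvB3, h0, h2', h3, if_false]
        exact ⟨rfl, fun h => absurd h (by simp [h2', h3])⟩

lemma pvBFlush_eqv (d : PySem.Dict String String) {q q' : Int × List Char × List Char}
    (h : pvEqv q q') : pvBFlush d q.1 q.2.1 q.2.2 = pvBFlush d q'.1 q'.2.1 q'.2.2 := by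
  obtain ⟨h1, h2⟩ := h
  by_cases h3 : q.1 = 3
  · have := h2 (Or.inr h3); rw [this]
  · rw [pvBFlush, pvBFlush, if_neg (by tauto), if_neg (fun (hq : q'.1 = 3 ∧ _) => h3 (h1.trans hq.1))]

-- skip state is absorbing
lemma pvB3_skip (r : List Char) (k v : List Char) :
    r.foldl pvB3 (1, k, v) = (1, k, v) := by
  induction r with
  | nil => rfl
  | cons c r ih => simpa [pvB3] using ih

-- value state accumulates the rest
lemma pvB3_val (r : List Char) (k v : List Char) :
    r.foldl pvB3 (3, k, v) = (3, k, v ++ r) := by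
  induction r generalizing v with
  | nil => simp
  | cons c r ih => simp [pvB3, ih]

-- key state: scan up to the first ':'
lemma pvB3_key (r : List Char) (k : List Char) :
    r.foldl pvB3 (2, k, []) =
      if ':' ∈ r then (3, k ++ r.takeWhile (fun c => c != ':'), (r.dropWhile (fun c => c != ':')).tail)
      else (2, k ++ r, []) := by
  induction r generalizing k with
  | nil => simp
  | cons c r ih =>
    by_cases hc : c = ':'
    · subst hc; simp [pvB3, pvB3_val]
    · have hne : ¬(':' = c ∨ ':' ∈ r) ↔ ¬(':' ∈ r) := by
        constructor
        · intro h hm; exact h (Or.inr hm)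
        · intro h hm; rcases hm with h1 | h1
          · exact hc h1.symm
          · exact h h1
      by_cases hm : ':' ∈ r
      · simp [pvB3, hc, ih, hm]
      · simp [pvB3, hc, ih, hm]
        exact fun h => hc h.symm

-- singleton suffix = last element
lemma pvSuffix_singleton (x : Char) (l : List Char) :
    [x].isSuffixOf l = (l.getLast? == some x) := by
  induction l using List.reverseRecOn with
  | nil => rfl
  | append_singleton l a ih => simp [List.isSuffixOf, List.isPrefixOf, eq_comm]

lemma pvSlice_tail (t : List Char) :
    PySem.List.slice t (some 1) (some (-1)) = t.tail.dropLast := by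
  cases t with
  | nil => rfl
  | cons c r =>
    simp [PySem.List.slice, PySem.List.clampIdx, List.dropLast_eq_take]
    rw [if_neg (by omega)]; omega

lemma pvSlice_dropLast (t : List Char) :
    PySem.List.slice t none (some (-1)) = t.dropLast := by
  cases t with
  | nil => rfl
  | cons c r =>
    simp [PySem.List.slice, PySem.List.clampIdx, List.dropLast_eq_take]
    rw [if_neg (by omega)]; omega

-- decomposition of a list at its first ':'
lemma pvColon_decomp (r : List Char) (h : ':' ∈ r) :
    r = r.takeWhile (fun c => c != ':') ++ ':' :: (r.dropWhile (fun c => c != ':')).tail ∧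
      ':' ∉ r.takeWhile (fun c => c != ':') := by
  induction r with
  | nil => cases h
  | cons c r ih =>
    by_cases hc : c = ':'
    · subst hc; simp [List.takeWhile_cons, List.dropWhile_cons]
    · have h' : ':' ∈ r := by
        rcases List.mem_cons.mp h with h1 | h1
        · exact absurd h1.symm hc
        · exact h1
      obtain ⟨ih1, ih2⟩ := ih h'
      constructor
      · simp only [List.takeWhile_cons, List.dropWhile_cons]
        rw [if_pos (by simp [hc]), if_pos (by simp [hc])]
        simpa using ih1
      · simp only [List.takeWhile_cons]
        rw [if_pos (by simp [hc])]
        intro hm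
        rcases List.mem_cons.mp hm with hm | hm
        · exact hc hm.symm
        · exact ih2 hm

-- takeWhile/dropWhile on the canonical decomposition
lemma pvColon_scan (p xs : List Char) (hp : ':' ∉ p) :
    (p ++ ':' :: xs).takeWhile (fun c => c != ':') = p ∧
      (p ++ ':' :: xs).dropWhile (fun c => c != ':') = ':' :: xs := by
  induction p with
  | nil => simp [List.takeWhile_cons, List.dropWhile_cons]
  | cons c p ih =>
    have hc : c ≠ ':' := fun hc => hp (by simp [hc])
    have hp' : ':' ∉ p := fun hm => hp (by simp [hm])
    obtain ⟨ih1, ih2⟩ := ih hp'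
    constructor
    · simp only [List.cons_append, List.takeWhile_cons]
      rw [if_pos (by simp [hc]), ih1]
    · simp only [List.cons_append, List.dropWhile_cons]
      rw [if_pos (by simp [hc]), ih2]

-- A's step on the canonical tag shape
lemma pvAProc_shape (d : PySem.Dict String String) (p s : List Char) (hp : ':' ∉ p) :
    pvAProc d ('[' :: (p ++ ':' :: s)) =
      if s.getLast? = some ']' then
        d.insert (String.ofList p) (String.ofList s.dropLast)
      else d := by
  have hpre : ['['].isPrefixOf ('[' :: (p ++ ':' :: s)) = true := by
    simp [List.isPrefixOf]
  have hlast : ('[' :: (p ++ ':' :: s)).getLast? = (':' :: s).getLast? := by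
    have : ('[' :: (p ++ ':' :: s)) = ('[' :: p) ++ ':' :: s := by simp
    rw [this, List.getLast?_append_of_ne_nil _ (by simp)]
  by_cases hs : s.getLast? = some ']'
  · have hsne : s ≠ [] := by rintro rfl; simp at hs
    have hsuf : [']'].isSuffixOf ('[' :: (p ++ ':' :: s)) = true := by
      rw [pvSuffix_singleton, hlast]
      rw [show (':' :: s) = [':'] ++ s from rfl, List.getLast?_append_of_ne_nil _ hsne, hs]; simp
    have hbody : ('[' :: (p ++ ':' :: s)).tail.dropLast = p ++ ':' :: s.dropLast := by
      simp only [List.tail_cons]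
      rw [List.dropLast_append_of_ne_nil (by simp)]
      congr 1
      exact List.dropLast_cons_of_ne_nil hsne
    obtain ⟨htw, hdw⟩ := pvColon_scan p s.dropLast hp
    rw [pvAProc, if_pos ⟨hpre, hsuf⟩]
    simp only [hbody]
    rw [if_pos (by simp), htw, hdw]
    simp [hs]
  · have hsuf : [']'].isSuffixOf ('[' :: (p ++ ':' :: s)) = false := by
      rw [pvSuffix_singleton, hlast]
      cases hse : s with
      | nil => simp
      | cons a t =>
        rw [show (':' :: (a :: t)) = [':'] ++ (a :: t) from rfl,
          List.getLast?_append_of_ne_nil _ (by simp), ← hse, beq_eq_false_iff_ne]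
        intro hcontra; exact hs hcontra
    rw [pvAProc]
    rw [if_neg (by simp [hsuf])]
    rw [if_neg hs]

-- B's trailing flush in value state, in the same shape
lemma pvBFlush_val (d : PySem.Dict String String) (p s : List Char) :
    pvBFlush d 3 p s =
      if s.getLast? = some ']' then
        d.insert (String.ofList p) (String.ofList s.dropLast)
      else d := by
  rw [pvBFlush]
  have he : PySem.Chars.endswith s [']'] = [']'].isSuffixOf s := rfl
  rw [he, pvSuffix_singleton]
  by_cases hs : s.getLast? = some ']'
  · rw [if_pos (by simp [hs]), if_pos hs, PySem.Chars.slice, pvSlice_dropLast]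
  · rw [if_neg (by simp [hs]), if_neg hs]

-- FLUSH: flushing the scan of a whole token is A's per-token step
lemma pvFlush_scan (d : PySem.Dict String String) (t : List Char) :
    pvBFlush d (pvScan t).1 (pvScan t).2.1 (pvScan t).2.2 = pvAProc d t := by
  cases t with
  | nil => simp [pvScan, pvBFlush, pvAProc, List.isPrefixOf]
  | cons c r =>
    by_cases hc : c = '['
    · subst hc
      have hstep : pvB3 (0, ([] : List Char), ([] : List Char)) '[' = (2, [], []) := by
        simp [pvB3]
      have hscan : pvScan ('[' :: r) = List.foldl pvB3 (2, [], []) r := by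
        simp [pvScan, hstep]
      by_cases hm : ':' ∈ r
      · obtain ⟨hdec, hp⟩ := pvColon_decomp r hm
        rw [hscan, pvB3_key, if_pos hm]
        have := pvAProc_shape d (r.takeWhile (fun c => c != ':'))
          ((r.dropWhile (fun c => c != ':')).tail) hp
        rw [show ('[' :: r) = '[' :: (r.takeWhile (fun c => c != ':') ++
              ':' :: (r.dropWhile (fun c => c != ':')).tail) from by rw [← hdec]]
        rw [this]
        simp [pvBFlush_val]
      · rw [hscan, pvB3_key, if_neg hm]
        rw [pvBFlush, if_neg (by simp)]
        rw [pvAProc]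
        by_cases hcond : ['['].isPrefixOf ('[' :: r) = true ∧ [']'].isSuffixOf ('[' :: r) = true
        · rw [if_pos hcond]
          rw [if_neg]
          intro hmem
          exact hm (List.mem_of_mem_dropLast (by simpa using hmem))
        · rw [if_neg hcond]
    · have hstep : pvB3 (0, ([] : List Char), ([] : List Char)) c = (1, [], []) := by
        simp [pvB3, hc]
      have hscan : pvScan (c :: r) = (1, [], []) := by
        simp [pvScan, hstep, pvB3_skip]
      rw [hscan, pvBFlush, if_neg (by simp), pvAProc, if_neg]
      rintro ⟨hpre, -⟩
      simp [List.isPrefixOf] at hpre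
      exact hc hpre.symm

-- split₀.go cons equations
lemma pvGo_cons_space (c : Char) (l cur : List Char) (acc : List (List Char))
    (hc : PySem.Chars.isspace c = true) :
    PySem.Chars.split₀.go (c :: l) cur acc =
      if cur.isEmpty then PySem.Chars.split₀.go l [] acc
      else PySem.Chars.split₀.go l [] (cur.reverse :: acc) := by
  rw [PySem.Chars.split₀.go]; simp [hc]

lemma pvGo_cons_nonspace (c : Char) (l cur : List Char) (acc : List (List Char))
    (hc : PySem.Chars.isspace c = false) :
    PySem.Chars.split₀.go (c :: l) cur acc = PySem.Chars.split₀.go l (c :: cur) acc := by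
  rw [PySem.Chars.split₀.go]; simp [hc]

-- accumulator lemma for split₀.go
lemma pvGo_acc (l : List Char) : ∀ (cur : List Char) (acc : List (List Char)),
    PySem.Chars.split₀.go l cur acc = acc.reverse ++ PySem.Chars.split₀.go l cur [] := by
  induction l with
  | nil =>
    intro cur acc
    rw [PySem.Chars.split₀.go, PySem.Chars.split₀.go]
    by_cases hcur : cur.isEmpty <;> simp [hcur]
  | cons c l ih =>
    intro cur acc
    by_cases hc : PySem.Chars.isspace c
    · rw [pvGo_cons_space c l cur acc hc, pvGo_cons_space c l cur [] hc]
      by_cases hcur : cur.isEmpty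
      · simp only [hcur, if_true, if_pos]
        exact ih [] acc
      · simp only [hcur, if_false, Bool.false_eq_true]
        rw [ih [] (cur.reverse :: acc), ih [] [cur.reverse]]
        simp
    · rw [pvGo_cons_nonspace c l cur acc (by simpa using hc),
          pvGo_cons_nonspace c l cur [] (by simpa using hc)]
      exact ih (c :: cur) acc

-- the flushed final value of B's fold
def pvFinish (s : PySem.Dict String String × Int × List Char × List Char) :
    PySem.Dict String String :=
  pvBFlush s.1 s.2.1 s.2.2.1 s.2.2.2

-- MAIN: A's fold over split₀'s tokens equals B's single pass
lemma pvMain (l : List Char) : ∀ (t : List Char) (d : PySem.Dict String String)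
    (q : Int × List Char × List Char), pvEqv q (pvScan t) →
    List.foldl pvAProc d (PySem.Chars.split₀.go l t.reverse []) =
      pvFinish (List.foldl pvBStep (d, q) l) := by
  induction l with
  | nil =>
    intro t d q hq
    rw [PySem.Chars.split₀.go]
    have hfl : pvBFlush d q.1 q.2.1 q.2.2 = pvAProc d t := by
      rw [pvBFlush_eqv d hq, pvFlush_scan]
    by_cases ht : t = []
    · subst ht
      simp only [List.reverse_nil, List.isEmpty_nil, if_true, List.foldl_nil]
      rw [pvFinish, hfl]
      simp [pvAProc, List.isPrefixOf]
    · rw [if_neg (by simpa using ht)]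
      simp only [List.reverse_reverse, List.reverse_cons, List.reverse_nil, List.nil_append,
        List.foldl_cons, List.foldl_nil]
      rw [pvFinish, hfl]
  | cons c l ih =>
    intro t d q hq
    rw [List.foldl_cons, pvBStep_eq]
    have hfl : pvBFlush d q.1 q.2.1 q.2.2 = pvAProc d t := by
      rw [pvBFlush_eqv d hq, pvFlush_scan]
    by_cases hc : PySem.Chars.isspace c
    · rw [if_pos hc, pvGo_cons_space c l t.reverse [] hc]
      have hq0 : pvEqv ((0 : Int), q.2.1, q.2.2) (pvScan []) := by
        refine ⟨rfl, fun h => ?_⟩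
        rcases h with h | h <;> simp at h
      by_cases ht : t = []
      · subst ht
        simp only [List.reverse_nil, List.isEmpty_nil, if_true]
        rw [← ih [] (pvBFlush d q.1 q.2.1 q.2.2) (0, q.2.1, q.2.2) hq0, hfl]
        have hnil : pvAProc d [] = d := by simp [pvAProc, List.isPrefixOf]
        rw [hnil]
        rfl
      · rw [if_neg (by simpa using ht)]
        simp only [List.reverse_reverse]
        rw [pvGo_acc l [] [t]]
        simp only [List.reverse_cons, List.reverse_nil, List.nil_append, List.singleton_append,
          List.foldl_cons]
        rw [← ih [] (pvBFlush d q.1 q.2.1 q.2.2) (0, q.2.1, q.2.2) hq0, hfl]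
        rfl
    · have hc' : PySem.Chars.isspace c = false := by simpa using hc
      rw [if_neg (by simp [hc']), pvGo_cons_nonspace c l t.reverse [] hc']
      rw [show (c :: t.reverse) = (t ++ [c]).reverse from by simp]
      have hq' : pvEqv (pvB3 q c) (pvScan (t ++ [c])) := by
        rw [show pvScan (t ++ [c]) = pvB3 (pvScan t) c from by simp [pvScan]]
        exact pvEqv_step hq c
      exact ih (t ++ [c]) d (pvB3 q c) hq'

-- splitOnMax.go with maxsplit exhausted
lemma pvSplitGo_zero (fuel : Nat) (l cur : List Char) (acc : List (List Char)) :
    PySem.Chars.splitOnMax.go [':'] fuel 0 l cur acc = ((cur.reverse ++ l) :: acc).reverse := by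
  cases fuel with
  | zero => rw [PySem.Chars.splitOnMax.go]
  | succ f =>
    cases l with
    | nil =>
      rw [PySem.Chars.splitOnMax.go]
      · simp
      · omega
    | cons c r => simp [PySem.Chars.splitOnMax.go]

-- splitOnMax.go on pre ++ ':' :: suf with maxsplit 1, pre colon-free
lemma pvSplitGo_one (pre : List Char) (hp : ':' ∉ pre) :
    ∀ (suf cur : List Char) (acc : List (List Char)) (fuel : Nat), pre.length < fuel →
    PySem.Chars.splitOnMax.go [':'] fuel 1 (pre ++ ':' :: suf) cur acc =
      acc.reverse ++ [cur.reverse ++ pre, suf] := by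
  induction pre with
  | nil =>
    intro suf cur acc fuel hf
    obtain ⟨f, rfl⟩ : ∃ f, fuel = f + 1 := ⟨fuel - 1, by omega⟩
    simp only [List.nil_append]
    rw [show PySem.Chars.splitOnMax.go [':'] (f + 1) 1 (':' :: suf) cur acc =
      if (1:Nat) = 0 then ((cur.reverse ++ (':' :: suf)) :: acc).reverse
      else if [':'].isPrefixOf (':' :: suf) then
        PySem.Chars.splitOnMax.go [':'] f 0 (List.drop [':'].length (':' :: suf)) [] (cur.reverse :: acc)
      else PySem.Chars.splitOnMax.go [':'] f 1 suf (':' :: cur) acc from by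
        simp [PySem.Chars.splitOnMax.go]]
    rw [if_neg (by norm_num)]
    rw [if_pos (by simp [List.isPrefixOf])]
    simp only [List.drop_succ_cons, List.drop_zero, List.length_cons, List.length_nil]
    rw [pvSplitGo_zero]
    simp
  | cons c pre ih =>
    intro suf cur acc fuel hf
    have hc : c ≠ ':' := fun hcc => hp (by simp [hcc])
    have hp' : ':' ∉ pre := fun hm => hp (by simp [hm])
    obtain ⟨f, rfl⟩ : ∃ f, fuel = f + 1 := ⟨fuel - 1, by omega⟩
    simp only [List.cons_append]
    rw [show PySem.Chars.splitOnMax.go [':'] (f + 1) 1 (c :: (pre ++ ':' :: suf)) cur acc =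
      if (1:Nat) = 0 then ((cur.reverse ++ (c :: (pre ++ ':' :: suf))) :: acc).reverse
      else if [':'].isPrefixOf (c :: (pre ++ ':' :: suf)) then
        PySem.Chars.splitOnMax.go [':'] f 0 (List.drop [':'].length (c :: (pre ++ ':' :: suf))) []
          (cur.reverse :: acc)
      else PySem.Chars.splitOnMax.go [':'] f 1 (pre ++ ':' :: suf) (c :: cur) acc from by
        simp [PySem.Chars.splitOnMax.go]]
    rw [if_neg (by norm_num)]
    rw [if_neg (by simp [List.isPrefixOf]; exact fun h => hc h.symm)]
    rw [ih hp' suf (c :: cur) acc f (by simpa using hf)]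
    simp

-- Chars-level split(":", 1) on the canonical decomposition
lemma pvSplitMax_chars (p s : List Char) (hp : ':' ∉ p) :
    PySem.Chars.splitMax? (p ++ ':' :: s) [':'] 1 = some [p, s] := by
  rw [PySem.Chars.splitMax?]
  rw [if_neg (by simp)]
  rw [PySem.Chars.splitOnMax]
  rw [if_neg (by norm_num)]
  simp only [Int.toNat_one]
  rw [pvSplitGo_one p hp s [] [] _ (by simp)]
  simp

-- ASTEP: A's string-level per-token step is pvAProc on the token's characters
set_option maxHeartbeats 4000000 in
lemma pvAStep (d : PySem.Dict String String) (tok : String) :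
    (fun (tags : PySem.Dict String String) (token : String) =>
      if !(PySem.Str.startswith token "[" && PySem.Str.endswith token "]") then tags
      else
        let body := PySem.Str.slice token (some 1) (some (-1))
        if !(PySem.Str.isIn ":" body) then tags
        else
          let parts := (PySem.Str.splitMax? body ":" 1).getD []
          let key := parts.getD 0 ""
          let value := parts.getD 1 ""
          tags.insert key value) d tok = pvAProc d tok.toList := by
  have hsw : PySem.Str.startswith tok "[" = ['['].isPrefixOf tok.toList := by
    rw [PySem.Str.startswith_eq]; rfl
  have hew : PySem.Str.endswith tok "]" = [']'].isSuffixOf tok.toList := by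
    rw [PySem.Str.endswith_eq]; rfl
  have hbody : (PySem.Str.slice tok (some 1) (some (-1))).toList
      = tok.toList.tail.dropLast := by
    rw [show (PySem.Str.slice tok (some 1) (some (-1))).toList
        = PySem.List.slice tok.toList (some 1) (some (-1)) from by
      simp [PySem.Str.slice, PySem.Chars.slice]]
    exact pvSlice_tail _
  by_cases hok : ['['].isPrefixOf tok.toList = true ∧ [']'].isSuffixOf tok.toList = true
  · obtain ⟨h1, h2⟩ := hok
    by_cases hm : ':' ∈ tok.toList.tail.dropLast
    · have hin : PySem.Str.isIn ":" (PySem.Str.slice tok (some 1) (some (-1))) = true := by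
        rw [PySem.Str.isIn_iff_infix]
        rw [show (":" : String).toList = [':'] from rfl, hbody]
        simpa [List.singleton_infix_iff] using hm
      obtain ⟨hdec, hp⟩ := pvColon_decomp _ hm
      have hsm : PySem.Str.splitMax? (PySem.Str.slice tok (some 1) (some (-1))) ":" 1 =
          some [String.ofList ((tok.toList.tail.dropLast).takeWhile (fun c => c != ':')),
                String.ofList (((tok.toList.tail.dropLast).dropWhile (fun c => c != ':')).tail)] := by
        have hbr := PySem.Str.splitMax?_map (PySem.Str.slice tok (some 1) (some (-1))) ":" 1
        rw [show (":" : String).toList = [':'] from rfl, hbody] at hbr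
        rw [show tok.toList.tail.dropLast = (tok.toList.tail.dropLast).takeWhile (fun c => c != ':') ++
              ':' :: ((tok.toList.tail.dropLast).dropWhile (fun c => c != ':')).tail from hdec,
            pvSplitMax_chars _ _ hp] at hbr
        cases hX : PySem.Str.splitMax? (PySem.Str.slice tok (some 1) (some (-1))) ":" 1 with
        | none => rw [hX] at hbr; simp at hbr
        | some l =>
          rw [hX] at hbr
          simp only [Option.map_some, Option.some.injEq] at hbr
          obtain ⟨a, b, rfl⟩ : ∃ a b, l = [a, b] := by
            cases l with
            | nil => simp at hbr
            | cons a l' =>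
              cases l' with
              | nil => simp at hbr
              | cons b l'' =>
                cases l'' with
                | nil => exact ⟨a, b, rfl⟩
                | cons x xs => simp at hbr
          simp only [List.map_cons, List.map_nil, List.cons.injEq, and_true] at hbr
          obtain ⟨ha, hb⟩ := hbr
          rw [← ha, ← hb, String.ofList_toList, String.ofList_toList]
      simp only [hsw, hew, h1, h2, Bool.and_self, Bool.not_true, Bool.false_eq_true,
        if_false, hin, hsm]
      rw [pvAProc, if_pos ⟨h1, h2⟩]
      simp only [Option.getD_some, List.getD_cons_zero, List.getD_cons_succ]
      rw [if_pos hm]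
    · have hin : PySem.Str.isIn ":" (PySem.Str.slice tok (some 1) (some (-1))) = false := by
        rw [Bool.eq_false_iff]
        intro hcontra
        rw [PySem.Str.isIn_iff_infix] at hcontra
        rw [show (":" : String).toList = [':'] from rfl, hbody] at hcontra
        exact hm (by simpa [List.singleton_infix_iff] using hcontra)
      simp only [hsw, hew, h1, h2, Bool.and_self, Bool.not_true, Bool.false_eq_true,
        if_false, hin, Bool.not_false, if_true]
      rw [pvAProc, if_pos ⟨h1, h2⟩]
      rw [if_neg hm]
  · have hc : (['['].isPrefixOf tok.toList && [']'].isSuffixOf tok.toList) = false := by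
      rcases Decidable.not_and_iff_not_or_not.mp hok with h | h <;>
        simp [Bool.eq_false_iff.mpr h]
    simp only [hsw, hew, hc, Bool.not_false, if_true]
    rw [pvAProc, if_neg (by simpa using hok)]

-- A's foldl over split₀ tokens, moved to character level
lemma pvA_eq (prompt : String) :
    parse_prompt_tags_py prompt =
      (List.foldl pvAProc PySem.Dict.empty (PySem.Chars.split₀ prompt.toList)).items := by
  rw [parse_prompt_tags_py]
  rw [show PySem.Str.split₀ prompt = (PySem.Chars.split₀ prompt.toList).map String.ofList
    from rfl]
  rw [List.foldl_map]
  apply congrArg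
  apply PySem.List.foldl_congr_mem
  intro acc cs _
  exact (pvAStep acc (String.ofList cs)).trans (by rw [String.toList_ofList])

-- ===== VERDICT (by name: the statement is the Claim_ definition above) =====
theorem parse_prompt_tags_py_spec : Claim_equal_parse_prompt_tags_py := by
  intro prompt _
  rw [Spec_parse_prompt_tags_py, pvA_eq]
  have hmain := pvMain prompt.toList [] PySem.Dict.empty (0, [], []) (pvEqv_refl _)
  rw [show (([] : List Char)).reverse = [] from rfl] at hmain
  rw [show PySem.Chars.split₀ prompt.toList = PySem.Chars.split₀.go prompt.toList [] []
    from rfl, hmain]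
  rfl
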